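-- pv_equiv track=rewrite | github.com/htriki1204/fdi-pln-2607 | Practica4/busqueda_semantica.py | combinar_encabezados
-- ===== SOURCE A (Python) =====
-- def combinar_encabezados(pasajes_chunk: list[dict[str, str]]) -> str:
--     encabezados: list[str] = []
--
--     for pasaje in pasajes_chunk:
--         encabezado = pasaje["encabezado"]
--         if encabezados and encabezados[-1] == encabezado:
--             continue
--         encabezados.append(encabezado)
--
--     if not encabezados:
--         return "Sin encabezado"
--
--     if len(encabezados) == 1:
--         return encabezados[0]
--
--     return f"{encabezados[0]} / {encabezados[-1]}"
-- ===== SOURCE B (Python) =====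
-- def combinar_encabezados(pasajes_chunk: list[dict[str, str]]) -> str:
--     if not pasajes_chunk:
--         return "Sin encabezado"
--     primero = pasajes_chunk[0]["encabezado"]
--     ultimo = pasajes_chunk[-1]["encabezado"]
--     if all(p["encabezado"] == primero for p in pasajes_chunk):
--         return primero
--     return f"{primero} / {ultimo}"
-- ===== Notes on version B (the rewrite author's own statement) =====
-- stated objective: simpler
-- what changed: Replaces the consecutive-dedup accumulator list with direct first/last indexing plus a single all-equal scan (the collapsed list has length 1 exactly when every header equals the first); Pre_ only excludes inputs where some passage lacks the 'encabezado' key, on which both programs raise KeyError.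
import Mathlib
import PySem

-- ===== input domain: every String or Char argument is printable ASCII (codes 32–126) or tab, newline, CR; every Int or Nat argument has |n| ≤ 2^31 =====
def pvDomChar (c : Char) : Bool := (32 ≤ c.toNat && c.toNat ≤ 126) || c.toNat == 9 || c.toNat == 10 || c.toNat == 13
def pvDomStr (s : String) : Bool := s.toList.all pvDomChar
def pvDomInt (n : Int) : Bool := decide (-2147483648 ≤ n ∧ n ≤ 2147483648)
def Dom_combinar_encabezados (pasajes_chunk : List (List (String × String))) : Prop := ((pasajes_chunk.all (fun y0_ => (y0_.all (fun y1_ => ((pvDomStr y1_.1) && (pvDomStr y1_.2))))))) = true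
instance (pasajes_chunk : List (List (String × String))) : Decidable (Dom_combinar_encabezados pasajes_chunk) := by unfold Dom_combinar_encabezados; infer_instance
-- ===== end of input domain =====

-- B replaces A's consecutive-dedup accumulator list with direct first/last access plus one
-- all-equal scan (objective: simpler).

-- ===== PORT A =====
-- pasaje["encabezado"]: first-match lookup in the association list; none = KeyError (excluded by Pre_)
def pvHdr? (pasaje : List (String × String)) : Option String :=
  (PySem.Dict.mk pasaje).get? "encabezado"

def pvHdr (pasaje : List (String × String)) : String := (pvHdr? pasaje).getD ""

-- the loop body: 'encabezado = pasaje["encabezado"]; if encabezados and encabezados[-1] == encabezado: continue; encabezados.append(encabezado)'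
def pvStepA (encabezados : List String) (pasaje : List (String × String)) : List String :=
  if encabezados ≠ [] ∧ encabezados.getLast? = some (pvHdr pasaje) then encabezados
  else encabezados ++ [pvHdr pasaje]

def combinar_encabezados (pasajes_chunk : List (List (String × String))) : String :=
  let encabezados := pasajes_chunk.foldl pvStepA []
  if encabezados = [] then "Sin encabezado"
  else if encabezados.length = 1 then PySem.List.pyGetD encabezados 0 ""
  else PySem.List.pyGetD encabezados 0 "" ++ " / " ++ PySem.List.pyGetD encabezados (-1) ""

-- ===== PORT B =====
-- primero = pasajes_chunk[0]["encabezado"], ultimo = pasajes_chunk[-1]["encabezado"]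
def combinar_encabezados_alt (pasajes_chunk : List (List (String × String))) : String :=
  if pasajes_chunk = [] then "Sin encabezado"
  else if pasajes_chunk.all (fun p => pvHdr p == pvHdr (PySem.List.pyGetD pasajes_chunk 0 [])) then
    pvHdr (PySem.List.pyGetD pasajes_chunk 0 [])
  else
    pvHdr (PySem.List.pyGetD pasajes_chunk 0 []) ++ " / " ++ pvHdr (PySem.List.pyGetD pasajes_chunk (-1) [])

-- ===== PRECONDITION & SPEC =====
-- Pre_ excludes exactly the inputs where some passage lacks the "encabezado" key: there the
-- Python A (and B alike) raises KeyError.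
def Pre_combinar_encabezados (pasajes_chunk : List (List (String × String))) : Prop :=
  ∀ p ∈ pasajes_chunk, (pvHdr? p).isSome

instance (pasajes_chunk : List (List (String × String))) : Decidable (Pre_combinar_encabezados pasajes_chunk) := by unfold Pre_combinar_encabezados; infer_instance

def pvWitness_combinar_encabezados : (List (List (String × String))) :=
  [[("encabezado", "Intro")], [("encabezado", "Intro")], [("encabezado", "Fin")]]

def Spec_combinar_encabezados (pasajes_chunk : List (List (String × String))) (out : String) : Prop := out = combinar_encabezados_alt pasajes_chunk
instance (pasajes_chunk : List (List (String × String))) (out : String) : Decidable (Spec_combinar_encabezados pasajes_chunk out) := by unfold Spec_combinar_encabezados; infer_instance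

-- ===== CLAIM (what is proved, stated in full; the proofs are below) =====
def Claim_equal_combinar_encabezados : Prop := ∀ (pasajes_chunk : List (List (String × String))), Dom_combinar_encabezados pasajes_chunk → Pre_combinar_encabezados pasajes_chunk → Spec_combinar_encabezados pasajes_chunk (combinar_encabezados pasajes_chunk)

-- ===== LEMMAS AND PROOFS =====

-- invariants of A's loop, for a nonempty accumulator
lemma foldl_stepA_ne_nil (hs : List (List (String × String))) (acc : List String)
    (h : acc ≠ []) : hs.foldl pvStepA acc ≠ [] := by
  induction hs generalizing acc with
  | nil => exact h
  | cons p ps ih =>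
    simp only [List.foldl_cons]
    apply ih
    unfold pvStepA
    split
    · exact h
    · simp

lemma foldl_stepA_head (hs : List (List (String × String))) (acc : List String)
    (h : acc ≠ []) : (hs.foldl pvStepA acc).head? = acc.head? := by
  induction hs generalizing acc with
  | nil => rfl
  | cons p ps ih =>
    simp only [List.foldl_cons]
    rw [ih]
    · unfold pvStepA
      split
      · rfl
      · cases acc with
        | nil => simp at h
        | cons a as => simp
    · unfold pvStepA
      split
      · exact h
      · simp

lemma foldl_stepA_last (hs : List (List (String × String))) (acc : List String)
    (h : acc ≠ []) (hne : hs ≠ []) :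
    (hs.foldl pvStepA acc).getLast? = (hs.map pvHdr).getLast? := by
  induction hs generalizing acc with
  | nil => exact absurd rfl hne
  | cons p ps ih =>
    simp only [List.foldl_cons]
    by_cases hps : ps = []
    · subst hps
      simp only [List.foldl_nil, List.map]
      unfold pvStepA
      split
      · rename_i hcond
        simp [hcond.2]
      · simp
    · rw [ih _ ?_ hps]
      · cases ps with
        | nil => exact absurd rfl hps
        | cons q t => simp only [List.map_cons, List.getLast?_cons_cons]
      · unfold pvStepA
        split
        · exact h
        · simp

-- the accumulator's length never decreases once it has two elements
lemma foldl_stepA_len_ge (hs : List (List (String × String))) (acc : List String)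
    (h : 2 ≤ acc.length) : 2 ≤ (hs.foldl pvStepA acc).length := by
  induction hs generalizing acc with
  | nil => exact h
  | cons p ps ih =>
    simp only [List.foldl_cons]
    apply ih
    unfold pvStepA
    split
    · exact h
    · simp; omega

-- the collapsed list stays a singleton iff every header equals the one already there
lemma foldl_stepA_singleton (hs : List (List (String × String))) (a : String) :
    hs.foldl pvStepA [a] = [a] ↔ ∀ p ∈ hs, pvHdr p = a := by
  induction hs generalizing a with
  | nil => simp
  | cons p ps ih =>
    by_cases hp : pvHdr p = a
    · have hstep : pvStepA [a] p = [a] := by unfold pvStepA; simp [hp]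
      simp only [List.foldl_cons, hstep, ih]
      constructor
      · intro h q hq
        rcases List.mem_cons.mp hq with hq' | hq'
        · rw [hq']; exact hp
        · exact h q hq'
      · intro h q hq; exact h q (List.mem_cons_of_mem _ hq)
    · have hstep : pvStepA [a] p = [a, pvHdr p] := by
        unfold pvStepA
        rw [if_neg]
        · rfl
        · rintro ⟨-, h2⟩
          simp only [List.getLast?_singleton, Option.some.injEq] at h2
          exact hp h2.symm
      simp only [List.foldl_cons, hstep]
      constructor
      · intro h
        exfalso
        have hlen := foldl_stepA_len_ge ps [a, pvHdr p] (by simp)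
        rw [h] at hlen
        simp at hlen
      · intro h
        exact absurd (h p (List.mem_cons_self)) hp

lemma map_getLast?_pvHdr (hs : List (List (String × String))) (hne : hs ≠ []) :
    (hs.map pvHdr).getLast? = some (pvHdr (hs.getLast hne)) := by
  induction hs with
  | nil => exact absurd rfl hne
  | cons p ps ih =>
    cases ps with
    | nil => simp
    | cons q t =>
      rw [List.map_cons, List.map_cons, List.getLast?_cons_cons, ← List.map_cons,
        List.getLast_cons (by simp), ih (by simp)]

-- ===== VERDICT (by name: the statement is the Claim_ definition above) =====
theorem combinar_encabezados_spec : Claim_equal_combinar_encabezados := by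
  intro pasajes_chunk _ _
  unfold Spec_combinar_encabezados combinar_encabezados combinar_encabezados_alt
  cases pasajes_chunk with
  | nil => rfl
  | cons p ps =>
    simp only [List.foldl_cons, reduceCtorEq, if_false]
    have hstep0 : pvStepA [] p = [pvHdr p] := by unfold pvStepA; simp
    rw [hstep0]
    generalize hE : List.foldl pvStepA [pvHdr p] ps = E
    have hEne : E ≠ [] := hE ▸ foldl_stepA_ne_nil ps [pvHdr p] (by simp)
    have hhead : E.head? = some (pvHdr p) := by
      rw [← hE, foldl_stepA_head ps [pvHdr p] (by simp)]; rfl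
    have hget0 : PySem.List.pyGetD E 0 "" = pvHdr p := by
      rw [PySem.List.pyGetD_zero]
      cases E with
      | nil => exact absurd rfl hEne
      | cons e es => simp at hhead ⊢; exact hhead
    have hget0' : PySem.List.pyGetD (p :: ps) 0 [] = p := by
      rw [PySem.List.pyGetD_zero_cons]
    have hlast' : PySem.List.pyGetD (p :: ps) (-1) [] = (p :: ps).getLast (by simp) :=
      PySem.List.pyGetD_neg_one _ _ (by simp)
    rw [hget0', hlast']
    have hall : ((p :: ps).all fun q => pvHdr q == pvHdr p) = true ↔ E = [pvHdr p] := by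
      rw [← hE, foldl_stepA_singleton]
      simp only [List.all_eq_true, beq_iff_eq]
      constructor
      · intro h q hq; exact h q (List.mem_cons_of_mem _ hq)
      · intro h q hq
        rcases List.mem_cons.mp hq with hq' | hq'
        · rw [hq']
        · exact h q hq'
    by_cases hAll : ((p :: ps).all fun q => pvHdr q == pvHdr p) = true
    · have hEeq : E = [pvHdr p] := hall.mp hAll
      rw [if_neg hEne, if_pos hAll, hEeq]
      simp [PySem.List.pyGetD_zero_cons]
    · have hEne1 : E ≠ [pvHdr p] := fun h => hAll (hall.mpr h)
      have hlen : ¬ E.length = 1 := by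
        intro hl
        cases E with
        | nil => simp at hl
        | cons e es =>
          cases es with
          | nil =>
            simp only [List.head?_cons, Option.some.injEq] at hhead
            exact hEne1 (by rw [hhead])
          | cons f fs => simp at hl
      rw [if_neg hEne, if_neg hlen, if_neg hAll]
      have hlastE : PySem.List.pyGetD E (-1) "" = pvHdr ((p :: ps).getLast (by simp)) := by
        by_cases hps : ps = []
        · subst hps
          simp only [List.foldl_nil] at hE
          exact absurd hE.symm hEne1
        · have h1 : E.getLast? = (ps.map pvHdr).getLast? :=
            hE ▸ foldl_stepA_last ps [pvHdr p] (by simp) hps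
          rw [map_getLast?_pvHdr ps hps, List.getLast?_eq_some_getLast hEne] at h1
          rw [PySem.List.pyGetD_neg_one E "" hEne, Option.some.inj h1,
            List.getLast_cons hps]
      rw [hget0, hlastE]
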